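-- pv_equiv track=rewrite | github.com/Pasha2302/Icodrops_App | pars_data_html.py | sort_dicts_by_max_keys
-- ===== SOURCE A (Python) =====
-- def sort_dicts_by_max_keys(list_of_dicts):
--     set_keys = set()
--     if not list_of_dicts:
--         return []
--     # Собираем все ключи словарей:
--     for data_dict in list_of_dicts:
--         for key in data_dict:
--             set_keys.add(key)
--     # max_dict = max(list_of_dicts, key=len)
--     # Отсортировать ключи эталонного словаря
--     # sorted_keys = sorted(max_dict.keys())
--     sorted_keys = sorted(list(set_keys))
--     # Создать новые словари с отсортированными ключами
--     sorted_dicts = [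
--         {key: dct.get(key, None) for key in sorted_keys}
--         for dct in list_of_dicts
--     ]
--     # Отсортировать список новых словарей
--     # sorted_list = sorted(sorted_dicts, key=lambda x: [x[key] if x[key] is not None else "" for key in sorted_keys])
--     return sorted_dicts
-- ===== SOURCE B (Python) =====
-- def _merge_union(a, b):
--     # union of two strictly increasing lists, strictly increasing
--     out = []
--     i = j = 0
--     while i < len(a) and j < len(b):
--         if a[i] < b[j]:
--             out.append(a[i]); i += 1
--         elif b[j] < a[i]:
--             out.append(b[j]); j += 1
--         else:
--             out.append(a[i]); i += 1; j += 1
--     out.extend(a[i:])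
--     out.extend(b[j:])
--     return out
--
-- def sort_dicts_by_max_keys(list_of_dicts):
--     if not list_of_dicts:
--         return []
--     # k-way merge: fold the individually sorted key lists into one sorted union
--     keys = []
--     for d in list_of_dicts:
--         keys = _merge_union(keys, sorted(d))
--     result = []
--     for d in list_of_dicts:
--         # align the dict's sorted items with the global key list by one linear scan
--         items = [(k, d[k]) for k in sorted(d)]
--         row = []
--         j = 0
--         for k in keys:
--             if j < len(items) and items[j][0] == k:
--                 row.append((k, items[j][1]))
--                 j += 1
--             else:
--                 row.append((k, None))
--         result.append(dict(row))
--     return result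
-- ===== Notes on version B (the rewrite author's own statement) =====
-- stated objective: alternative
-- what changed: A collects all keys into one global set, sorts it, and rebuilds every dict with a per-key .get lookup; B never builds a set or does keyed lookups: it folds the individually sorted key lists into the sorted union via a two-pointer sorted-merge, and builds each output row by a single linear two-pointer alignment of the global key list with that dict's sorted items; Pre_ only excludes Lean-side association lists with duplicate keys, which represent no Python dict input.
import Mathlib
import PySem

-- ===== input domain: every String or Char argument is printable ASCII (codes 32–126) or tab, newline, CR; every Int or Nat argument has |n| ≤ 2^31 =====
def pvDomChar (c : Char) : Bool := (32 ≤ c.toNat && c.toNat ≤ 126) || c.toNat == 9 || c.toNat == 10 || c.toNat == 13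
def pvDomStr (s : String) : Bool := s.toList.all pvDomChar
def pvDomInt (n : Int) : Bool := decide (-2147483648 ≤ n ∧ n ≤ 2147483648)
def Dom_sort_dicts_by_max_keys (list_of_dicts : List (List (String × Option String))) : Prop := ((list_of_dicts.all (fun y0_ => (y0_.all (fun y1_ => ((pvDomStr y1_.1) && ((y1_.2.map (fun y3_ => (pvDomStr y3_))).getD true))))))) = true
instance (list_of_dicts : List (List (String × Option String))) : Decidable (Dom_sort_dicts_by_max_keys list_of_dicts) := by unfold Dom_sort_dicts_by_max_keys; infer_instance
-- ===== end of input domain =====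

-- B replaces A's global key set + per-key dct.get rebuild by a k-way sorted-merge of the
-- individually sorted key lists and a per-dict two-pointer alignment scan (objective: alternative).

-- ===== PORT A =====
def sort_dicts_by_max_keys (list_of_dicts : List (List (String × Option String))) : List (List (String × Option String)) :=
  let set_keys : PySem.Set String := PySem.Set.empty
  if list_of_dicts = [] then []
  else
    -- for data_dict in list_of_dicts: for key in data_dict: set_keys.add(key)
    let set_keys := list_of_dicts.foldl
      (fun s data_dict => data_dict.foldl (fun s kv => PySem.Set.add s kv.1) s) set_keys
    let sorted_keys := PySem.List.sorted set_keys (fun k => k) false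
    -- [{key: dct.get(key, None) for key in sorted_keys} for dct in list_of_dicts]
    list_of_dicts.map (fun dct =>
      sorted_keys.map (fun key => (key, ((PySem.Dict.mk dct).get? key).getD none)))

-- ===== PORT B =====
-- _merge_union: union of two strictly increasing lists (the while loop as the obvious
-- structural recursion: each branch consumes the pointer it advances; the base cases are the extends)
def pvMergeUnion : List String → List String → List String
  | [], ys => ys
  | x :: xs, [] => x :: xs
  | x :: xs, y :: ys =>
    if x < y then x :: pvMergeUnion xs (y :: ys)
    else if y < x then y :: pvMergeUnion (x :: xs) ys
    else x :: pvMergeUnion xs ys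

-- the `for k in keys` loop with cursor j over items: the cursor is the rest of the items list
def pvBuildRow : List String → List (String × Option String) → List (String × Option String)
  | [], _ => []
  | k :: ks, [] => (k, none) :: pvBuildRow ks []
  | k :: ks, (k', v) :: rest =>
    if k' = k then (k, v) :: pvBuildRow ks rest
    else (k, none) :: pvBuildRow ks ((k', v) :: rest)

def sort_dicts_by_max_keys_alt (list_of_dicts : List (List (String × Option String))) : List (List (String × Option String)) :=
  if list_of_dicts = [] then []
  else
    -- keys = []; for d in list_of_dicts: keys = _merge_union(keys, sorted(d))
    let keys := list_of_dicts.foldl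
      (fun ks d => pvMergeUnion ks (PySem.List.sorted (d.map Prod.fst) (fun k => k) false)) []
    -- for d: items = [(k, d[k]) for k in sorted(d)]; two-pointer row; dict(row)
    list_of_dicts.map (fun d =>
      let items := (PySem.List.sorted (d.map Prod.fst) (fun k => k) false).map
        (fun k => (k, ((PySem.Dict.mk d).get? k).getD none))
      (PySem.Dict.ofList (pvBuildRow keys items)).items)

-- ===== PRECONDITION & SPEC =====
-- Pre_ excludes inner association lists with duplicate keys: those represent no Python
-- dict argument (a Python dict cannot carry duplicate keys), and on them the
-- assoc-list reading is accidental (A's port dedups keys via its set, B's sorted merge does not).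
def Pre_sort_dicts_by_max_keys (list_of_dicts : List (List (String × Option String))) : Prop :=
  ∀ dct ∈ list_of_dicts, (dct.map Prod.fst).Nodup
instance (list_of_dicts : List (List (String × Option String))) : Decidable (Pre_sort_dicts_by_max_keys list_of_dicts) := by unfold Pre_sort_dicts_by_max_keys; infer_instance

def pvWitness_sort_dicts_by_max_keys : (List (List (String × Option String))) :=
  [[("b", some "1"), ("a", none)], [("c", some "2")], []]

def Spec_sort_dicts_by_max_keys (list_of_dicts : List (List (String × Option String))) (out : List (List (String × Option String))) : Prop := out = sort_dicts_by_max_keys_alt list_of_dicts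
instance (list_of_dicts : List (List (String × Option String))) (out : List (List (String × Option String))) : Decidable (Spec_sort_dicts_by_max_keys list_of_dicts out) := by unfold Spec_sort_dicts_by_max_keys; infer_instance

-- ===== CLAIM (what is proved, stated in full; the proofs are below) =====
def Claim_equal_sort_dicts_by_max_keys : Prop := ∀ (list_of_dicts : List (List (String × Option String))), Dom_sort_dicts_by_max_keys list_of_dicts → Pre_sort_dicts_by_max_keys list_of_dicts → Spec_sort_dicts_by_max_keys list_of_dicts (sort_dicts_by_max_keys list_of_dicts)

-- ===== LEMMAS AND PROOFS =====

lemma mem_pvMergeUnion (a b : List String) (x : String) :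
    x ∈ pvMergeUnion a b ↔ x ∈ a ∨ x ∈ b := by
  induction a, b using pvMergeUnion.induct with
  | case1 ys => simp [pvMergeUnion]
  | case2 x' xs => simp [pvMergeUnion]
  | case3 x' xs y ys h ih => simp only [pvMergeUnion, if_pos h, List.mem_cons, ih]; tauto
  | case4 x' xs y ys h1 h2 ih => simp only [pvMergeUnion, if_neg h1, if_pos h2, List.mem_cons, ih]; tauto
  | case5 x' xs y ys h1 h2 ih =>
    have hxy : x' = y := le_antisymm (not_lt.mp h2) (not_lt.mp h1)
    simp only [pvMergeUnion, if_neg h1, if_neg h2, List.mem_cons, ih]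
    subst hxy; tauto

lemma pairwise_pvMergeUnion (a b : List String)
    (ha : a.Pairwise (· < ·)) (hb : b.Pairwise (· < ·)) :
    (pvMergeUnion a b).Pairwise (· < ·) := by
  induction a, b using pvMergeUnion.induct with
  | case1 ys => simpa [pvMergeUnion] using hb
  | case2 x xs => simpa [pvMergeUnion] using ha
  | case3 x xs y ys h ih =>
    simp only [pvMergeUnion, if_pos h]
    rw [List.pairwise_cons] at ha hb ⊢
    refine ⟨fun z hz => ?_, ih ha.2 (List.pairwise_cons.mpr hb)⟩
    rcases (mem_pvMergeUnion _ _ _).mp hz with hz | hz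
    · exact ha.1 z hz
    · rcases List.mem_cons.mp hz with rfl | hz
      · exact h
      · exact lt_trans h (hb.1 z hz)
  | case4 x xs y ys h1 h2 ih =>
    simp only [pvMergeUnion, if_neg h1, if_pos h2]
    rw [List.pairwise_cons] at ha hb ⊢
    refine ⟨fun z hz => ?_, ih (List.pairwise_cons.mpr ha) hb.2⟩
    rcases (mem_pvMergeUnion _ _ _).mp hz with hz | hz
    · rcases List.mem_cons.mp hz with rfl | hz
      · exact h2
      · exact lt_trans h2 (ha.1 z hz)
    · exact hb.1 z hz
  | case5 x xs y ys h1 h2 ih =>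
    have hxy : x = y := le_antisymm (not_lt.mp h2) (not_lt.mp h1)
    simp only [pvMergeUnion, if_neg h1, if_neg h2]
    rw [List.pairwise_cons] at ha hb ⊢
    refine ⟨fun z hz => ?_, ih ha.2 hb.2⟩
    rcases (mem_pvMergeUnion _ _ _).mp hz with hz | hz
    · exact ha.1 z hz
    · exact hxy ▸ hb.1 z hz

-- sorted of a Nodup String list is strictly increasing
lemma sorted_pairwise_lt (xs : List String) (h : xs.Nodup) :
    (PySem.List.sorted xs (fun k => k) false).Pairwise (· < ·) := by
  have hle := PySem.List.sorted_pairwise xs (fun k => k)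
  have hnd : (PySem.List.sorted xs (fun k => k) false).Nodup :=
    (PySem.List.sorted_perm xs (fun k => k) false).nodup_iff.mpr h
  exact (hle.and hnd).imp (fun {a b} hab => lt_of_le_of_ne hab.1 hab.2)

-- B's key fold: membership
lemma foldl_merge_mem (l : List (List (String × Option String))) (acc : List String) (x : String) :
    x ∈ l.foldl (fun ks d => pvMergeUnion ks (PySem.List.sorted (d.map Prod.fst) (fun k => k) false)) acc
      ↔ x ∈ acc ∨ ∃ d ∈ l, ∃ kv ∈ d, x = kv.1 := by
  induction l generalizing acc with
  | nil => simp
  | cons d t ih =>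
    simp only [List.foldl_cons, ih, mem_pvMergeUnion, PySem.List.mem_sorted, List.mem_map]
    constructor
    · rintro ((h | ⟨kv, hkv, rfl⟩) | ⟨d', hd', kv, hkv, rfl⟩)
      · exact Or.inl h
      · exact Or.inr ⟨d, by simp, kv, hkv, rfl⟩
      · exact Or.inr ⟨d', by simp [hd'], kv, hkv, rfl⟩
    · rintro (h | ⟨d', hd', kv, hkv, rfl⟩)
      · exact Or.inl (Or.inl h)
      · rcases List.mem_cons.mp hd' with rfl | hd'
        · exact Or.inl (Or.inr ⟨kv, hkv, rfl⟩)
        · exact Or.inr ⟨d', hd', kv, hkv, rfl⟩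

-- B's key fold: strictly increasing
lemma foldl_merge_pairwise (l : List (List (String × Option String)))
    (hpre : ∀ d ∈ l, (d.map Prod.fst).Nodup) (acc : List String) (hacc : acc.Pairwise (· < ·)) :
    (l.foldl (fun ks d => pvMergeUnion ks (PySem.List.sorted (d.map Prod.fst) (fun k => k) false)) acc).Pairwise (· < ·) := by
  induction l generalizing acc with
  | nil => exact hacc
  | cons d t ih =>
    exact ih (fun d' hd' => hpre d' (List.mem_cons_of_mem _ hd')) _
      (pairwise_pvMergeUnion _ _ hacc (sorted_pairwise_lt _ (hpre d (by simp))))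

-- A's nested key-collecting fold: membership
lemma mem_collect (l : List (List (String × Option String))) (s : PySem.Set String) (y : String) :
    y ∈ l.foldl (fun s dct => dct.foldl (fun s kv => PySem.Set.add s kv.1) s) s
      ↔ y ∈ s ∨ ∃ d ∈ l, ∃ kv ∈ d, y = kv.1 := by
  induction l generalizing s with
  | nil => simp
  | cons d t ih =>
    simp only [List.foldl_cons, ih, PySem.Set.mem_foldl_add]
    constructor
    · rintro (h | h)
      · rcases h with h | ⟨kv, hkv, rfl⟩
        · exact Or.inl h
        · exact Or.inr ⟨d, by simp, kv, hkv, rfl⟩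
      · rcases h with ⟨d', hd', kv, hkv, rfl⟩
        exact Or.inr ⟨d', by simp [hd'], kv, hkv, rfl⟩
    · rintro (h | ⟨d', hd', kv, hkv, rfl⟩)
      · exact Or.inl (Or.inl h)
      · rcases List.mem_cons.mp hd' with rfl | hd'
        · exact Or.inl (Or.inr ⟨kv, hkv, rfl⟩)
        · exact Or.inr ⟨d', hd', kv, hkv, rfl⟩

-- A's nested key-collecting fold: no duplicates
lemma nodup_foldl_add {β : Type} (l : List β) (f : β → String) (s : PySem.Set String)
    (h : s.Nodup) : (l.foldl (fun s b => PySem.Set.add s (f b)) s).Nodup := by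
  induction l generalizing s with
  | nil => exact h
  | cons b t ih => exact ih _ (PySem.Set.nodup_add _ _ h)

lemma nodup_collect (l : List (List (String × Option String))) (s : PySem.Set String)
    (h : s.Nodup) :
    (l.foldl (fun s dct => dct.foldl (fun s kv => PySem.Set.add s kv.1) s) s).Nodup := by
  induction l generalizing s with
  | nil => exact h
  | cons d t ih => exact ih _ (nodup_foldl_add d Prod.fst s h)

-- first-match lookup in a value-map literal
lemma get?_mk_map (xs : List String) (g : String → Option String) (k : String) :
    (PySem.Dict.mk (xs.map (fun x => (x, g x)))).get? k
      = if k ∈ xs then some (g k) else none := by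
  induction xs with
  | nil => simp [PySem.Dict.get?]
  | cons x t ih =>
    rw [List.map_cons, PySem.Dict.get?_mk_cons, ih]
    by_cases hx : x = k
    · subst hx; simp
    · simp [hx, Ne.symm hx]

lemma get?_mk_none_of_forall (items : List (String × Option String)) (k : String)
    (h : ∀ p ∈ items, p.1 ≠ k) : (PySem.Dict.mk items).get? k = none := by
  induction items with
  | nil => simp [PySem.Dict.get?]
  | cons p t ih =>
    rw [PySem.Dict.get?_mk_cons, if_neg (by simpa using h p (by simp))]
    exact ih (fun q hq => h q (by simp [hq]))

-- the two-pointer scan produces exactly the per-key first-match lookup row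
lemma pvBuildRow_eq (keys : List String) (items : List (String × Option String))
    (hk : keys.Pairwise (· < ·)) (hi : (items.map Prod.fst).Pairwise (· < ·))
    (hsub : ∀ p ∈ items, p.1 ∈ keys) :
    pvBuildRow keys items
      = keys.map (fun k => (k, ((PySem.Dict.mk items).get? k).getD none)) := by
  induction keys generalizing items with
  | nil => rfl
  | cons k ks ihk =>
    rw [List.pairwise_cons] at hk
    cases items with
    | nil =>
      simp only [pvBuildRow, List.map_cons]
      rw [ihk [] hk.2 (by simp) (by simp)]
      simp [PySem.Dict.get?]
    | cons p rest =>
      obtain ⟨k', v⟩ := p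
      rw [List.map_cons] at hi
      rw [List.pairwise_cons] at hi
      by_cases hkk : k' = k
      · subst hkk
        have hsub' : ∀ q ∈ rest, q.1 ∈ ks := by
          intro q hq
          have hgt : k' < q.1 := hi.1 q.1 (List.mem_map_of_mem hq)
          rcases List.mem_cons.mp (hsub q (List.mem_cons_of_mem _ hq)) with he | h
          · exact absurd he (ne_of_gt hgt)
          · exact h
        simp only [pvBuildRow, List.map_cons]
        rw [ihk rest hk.2 hi.2 hsub']
        refine List.cons_eq_cons.mpr ⟨by rw [PySem.Dict.get?_mk_cons]; simp, ?_⟩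
        refine List.map_congr_left (fun k2 hk2 => ?_)
        rw [PySem.Dict.get?_mk_cons, if_neg (by simpa using ne_of_lt (hk.1 k2 hk2))]
      · -- k' ≠ k, hence k < k' and key k is absent from items
        have hk'mem : k' ∈ ks := by
          rcases List.mem_cons.mp (hsub (k', v) (by simp)) with he | h
          · exact absurd he hkk
          · exact h
        have hklt : k < k' := hk.1 k' hk'mem
        have hsub' : ∀ q ∈ (k', v) :: rest, q.1 ∈ ks := by
          intro q hq
          rcases List.mem_cons.mp hq with rfl | hq
          · exact hk'mem
          · have hgt : k' < q.1 := hi.1 q.1 (List.mem_map_of_mem hq)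
            rcases List.mem_cons.mp (hsub q (List.mem_cons_of_mem _ hq)) with he | h
            · exact absurd he (ne_of_gt (lt_trans hklt hgt))
            · exact h
        have habsent : (PySem.Dict.mk ((k', v) :: rest)).get? k = none := by
          refine get?_mk_none_of_forall _ _ (fun q hq => ?_)
          rcases List.mem_cons.mp hq with rfl | hq
          · exact hkk
          · exact ne_of_gt (lt_trans hklt (hi.1 q.1 (List.mem_map_of_mem hq)))
        simp only [pvBuildRow, if_neg hkk, List.map_cons]
        rw [ihk ((k', v) :: rest) hk.2 (List.pairwise_cons.mpr hi) hsub', habsent]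
        simp

-- dict(row) for a row with pairwise-distinct keys is row itself
lemma ofList_items_of_nodup (row : List (String × Option String))
    (h : (row.map Prod.fst).Nodup) : (PySem.Dict.ofList row).items = row := by
  have := PySem.Dict.items_foldl_insert_fresh row Prod.fst Prod.snd PySem.Dict.empty
    (fun a _ => by simp [PySem.Dict.contains_empty]) h
  simpa [PySem.Dict.ofList, PySem.Dict.update, PySem.Dict.empty] using this

-- ===== VERDICT (by name: the statement is the Claim_ definition above) =====
theorem sort_dicts_by_max_keys_spec : Claim_equal_sort_dicts_by_max_keys := by
  intro l _ hpre
  unfold Spec_sort_dicts_by_max_keys sort_dicts_by_max_keys sort_dicts_by_max_keys_alt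
  by_cases hl : l = []
  · simp [hl]
  · simp only [if_neg hl]
    -- B's merged key list is a strictly increasing enumeration of A's key set
    have hkpw : (l.foldl (fun ks d => pvMergeUnion ks (PySem.List.sorted (d.map Prod.fst) (fun k => k) false)) []).Pairwise (· < ·) :=
      foldl_merge_pairwise l hpre [] (by simp)
    have hknd : (l.foldl (fun ks d => pvMergeUnion ks (PySem.List.sorted (d.map Prod.fst) (fun k => k) false)) []).Nodup :=
      List.Pairwise.imp (fun hab => ne_of_lt hab) hkpw
    have hsnd : (l.foldl (fun s dct => dct.foldl (fun s kv => PySem.Set.add s kv.1) s) PySem.Set.empty).Nodup :=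
      nodup_collect l PySem.Set.empty (by simp [PySem.Set.empty])
    have hperm : (l.foldl (fun ks d => pvMergeUnion ks (PySem.List.sorted (d.map Prod.fst) (fun k => k) false)) []).Perm
        (l.foldl (fun s dct => dct.foldl (fun s kv => PySem.Set.add s kv.1) s) PySem.Set.empty) := by
      rw [List.perm_ext_iff_of_nodup hknd hsnd]
      intro x
      rw [foldl_merge_mem, mem_collect]
      simp [PySem.Set.empty]
    have hkeys : PySem.List.sorted
        (l.foldl (fun s dct => dct.foldl (fun s kv => PySem.Set.add s kv.1) s) PySem.Set.empty)
        (fun k => k) false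
        = l.foldl (fun ks d => pvMergeUnion ks (PySem.List.sorted (d.map Prod.fst) (fun k => k) false)) [] :=
      PySem.List.sorted_eq_of_perm_of_pairwise_lt _ _ _ hperm hkpw
    rw [hkeys]
    refine List.map_congr_left (fun d hd => ?_)
    set keys := l.foldl (fun ks d => pvMergeUnion ks (PySem.List.sorted (d.map Prod.fst) (fun k => k) false)) [] with hkeysdef
    -- B's row for d
    rw [pvBuildRow_eq keys _ hkpw ?_ ?_]
    · rw [ofList_items_of_nodup _ (by simpa [List.map_map, Function.comp_def] using hknd)]
      refine List.map_congr_left (fun k _ => ?_)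
      rw [get?_mk_map]
      by_cases hmem : k ∈ PySem.List.sorted (d.map Prod.fst) (fun k => k) false
      · simp [hmem]
      · rw [if_neg hmem]
        have : (PySem.Dict.mk d).get? k = none := by
          rw [PySem.Dict.get?_eq_none_iff_not_mem_keys, PySem.Dict.keys_mk]
          rw [PySem.List.mem_sorted] at hmem
          exact hmem
        simp [this]
    · simpa [List.map_map, Function.comp_def] using
        sorted_pairwise_lt (d.map Prod.fst) (hpre d hd)
    · intro p hp
      rw [List.mem_map] at hp
      obtain ⟨k, hk, rfl⟩ := hp
      rw [PySem.List.mem_sorted] at hk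
      rw [hkeysdef, foldl_merge_mem]
      rcases List.mem_map.mp hk with ⟨kv, hkv, rfl⟩
      exact Or.inr ⟨d, hd, kv, hkv, rfl⟩
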